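-- pv_equiv track=rewrite | github.com/raeez/chiral-bar-cobar | compute/lib/cy_mock_modular_bps_engine.py | m24_decomposition_check
-- ===== SOURCE A (Python) =====
-- M24_IRREP_DIMS = sorted([
--     1, 23, 45, 45, 231, 231, 252, 253, 483, 770, 770,
--     990, 990, 1035, 1035, 1035, 1265, 1771, 2024, 2277,
--     3312, 3520, 5313, 5544, 5796, 10395
-- ])
--
-- def m24_decomposition_check(target: int) -> bool:
--     r"""Check if target is a non-negative integer combination of M24 irrep dims.
--
--     Uses the unbounded knapsack DP (array-based, O(target * num_dims)).
--     This is a necessary condition for a_n to be an M24 representation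
--     dimension (virtual or genuine).
--     """
--     if target <= 0:
--         return target == 0
--     unique_dims = sorted(set(M24_IRREP_DIMS))
--     # dp[v] = True if v is achievable as a non-negative integer combination
--     dp = [False] * (target + 1)
--     dp[0] = True
--     for d in unique_dims:
--         for v in range(d, target + 1):
--             if dp[v - d]:
--                 dp[v] = True
--     return dp[target]
-- ===== SOURCE B (Python) =====
-- M24_IRREP_DIMS = sorted([
--     1, 23, 45, 45, 231, 231, 252, 253, 483, 770, 770,
--     990, 990, 1035, 1035, 1035, 1265, 1771, 2024, 2277,
--     3312, 3520, 5313, 5544, 5796, 10395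
-- ])
--
-- def m24_decomposition_check(target: int) -> bool:
--     # The dimension list contains 1, so every non-negative integer is a
--     # non-negative integer combination of the dims: target*1.  O(1).
--     return target >= 0
-- ===== Notes on version B (the rewrite author's own statement) =====
-- stated objective: faster
-- what changed: Replaced the unbounded-knapsack DP with the closed form 'target >= 0': since the irrep dimension 1 is in the list, every non-negative integer is achievable, so the DP always returns True for target >= 0 and False otherwise.
import Mathlib
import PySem

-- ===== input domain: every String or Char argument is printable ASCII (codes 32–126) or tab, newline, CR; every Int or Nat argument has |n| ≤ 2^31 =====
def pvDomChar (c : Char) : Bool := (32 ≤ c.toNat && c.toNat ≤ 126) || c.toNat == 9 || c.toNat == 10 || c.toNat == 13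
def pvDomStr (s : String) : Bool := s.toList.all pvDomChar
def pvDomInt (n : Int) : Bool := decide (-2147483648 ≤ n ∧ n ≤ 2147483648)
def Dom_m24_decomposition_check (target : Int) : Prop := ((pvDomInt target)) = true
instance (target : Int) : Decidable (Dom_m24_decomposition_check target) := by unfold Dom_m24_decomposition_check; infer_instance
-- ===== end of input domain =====

-- B replaces A's unbounded-knapsack DP by the closed form 'target >= 0' (dim 1 is
-- in the list, so every non-negative integer is achievable); objective: faster.

-- ===== PORT A =====
def M24_IRREP_DIMS : List Int :=
  PySem.List.sorted [1, 23, 45, 45, 231, 231, 252, 253, 483, 770, 770,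
    990, 990, 1035, 1035, 1035, 1265, 1771, 2024, 2277,
    3312, 3520, 5313, 5544, 5796, 10395] (fun x => x) false

-- inner 'for v in range(d, target + 1): if dp[v - d]: dp[v] = True'
-- (pyGetD/pySetD are exact here: v - d and v are always in range of dp)
def m24InnerLoop (target d : Int) (dp : List Bool) : List Bool :=
  (PySem.List.pyRange d (target + 1) 1).foldl
    (fun dp v => if PySem.List.pyGetD dp (v - d) false then PySem.List.pySetD dp v true else dp)
    dp

def m24_decomposition_check (target : Int) : Bool :=
  if target ≤ 0 then target == 0
  else
    let uniqueDims := PySem.List.sorted (PySem.Set.ofList M24_IRREP_DIMS) (fun x => x) false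
    let dp := List.replicate (target + 1).toNat false
    let dp := PySem.List.pySetD dp 0 true
    let dp := uniqueDims.foldl (fun dp d => m24InnerLoop target d dp) dp
    PySem.List.pyGetD dp target false

-- ===== PORT B =====
def m24_decomposition_check_alt (target : Int) : Bool := decide (0 ≤ target)

-- ===== PRECONDITION & SPEC =====
def Spec_m24_decomposition_check (target : Int) (out : Bool) : Prop := out = m24_decomposition_check_alt target
instance (target : Int) (out : Bool) : Decidable (Spec_m24_decomposition_check target out) := by unfold Spec_m24_decomposition_check; infer_instance

-- ===== CLAIM (what is proved, stated in full; the proofs are below) =====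
def Claim_equal_m24_decomposition_check : Prop := ∀ (target : Int), Dom_m24_decomposition_check target → Spec_m24_decomposition_check target (m24_decomposition_check target)

-- ===== LEMMAS AND PROOFS =====

-- folding the DP step over any list of non-negative indices preserves
-- "every element of dp is true" and the length of dp
theorem step_allTrue (d : Int) (l : List Int) (dp : List Bool)
    (hl : ∀ v ∈ l, 0 ≤ v) (h : ∀ x ∈ dp, x = true) :
    (∀ x ∈ l.foldl
        (fun dp v => if PySem.List.pyGetD dp (v - d) false then PySem.List.pySetD dp v true else dp)
        dp, x = true) ∧
      (l.foldl
        (fun dp v => if PySem.List.pyGetD dp (v - d) false then PySem.List.pySetD dp v true else dp)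
        dp).length = dp.length := by
  induction l generalizing dp with
  | nil => exact ⟨h, rfl⟩
  | cons v l ih =>
    have hv : (0:Int) ≤ v := hl v (List.mem_cons_self ..)
    have hstep : (∀ x ∈ (if PySem.List.pyGetD dp (v - d) false then PySem.List.pySetD dp v true else dp),
        x = true) ∧
        (if PySem.List.pyGetD dp (v - d) false then PySem.List.pySetD dp v true else dp).length
          = dp.length := by
      split
      · rw [PySem.List.pySetD_of_nonneg _ _ hv]
        constructor
        · intro x hx
          rcases List.mem_or_eq_of_mem_set hx with hx' | hx'
          · exact h x hx'
          · exact hx'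
        · exact List.length_set ..
      · exact ⟨h, rfl⟩
    simpa using (ih _ (fun w hw => hl w (List.mem_cons_of_mem _ hw)) hstep.1).imp
      (fun a => a) (fun hlen => hlen.trans hstep.2)

-- the inner loop (for a non-negative dim) preserves all-true and the length
theorem innerLoop_allTrue (target d : Int) (hd : 0 ≤ d) (dp : List Bool)
    (h : ∀ x ∈ dp, x = true) :
    (∀ x ∈ m24InnerLoop target d dp, x = true) ∧
      (m24InnerLoop target d dp).length = dp.length := by
  unfold m24InnerLoop
  refine step_allTrue d _ dp (fun v hv => ?_) h
  have := (PySem.List.mem_pyRange_one).mp hv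
  omega

-- folding the dims over an all-true dp keeps it all true, same length
theorem outer_allTrue (target : Int) (ds : List Int) (hds : ∀ d ∈ ds, 0 ≤ d) (dp : List Bool)
    (h : ∀ x ∈ dp, x = true) :
    (∀ x ∈ ds.foldl (fun dp d => m24InnerLoop target d dp) dp, x = true) ∧
      (ds.foldl (fun dp d => m24InnerLoop target d dp) dp).length = dp.length := by
  induction ds generalizing dp with
  | nil => exact ⟨h, rfl⟩
  | cons d ds ih =>
    obtain ⟨h1, h2⟩ := innerLoop_allTrue target d (hds d (List.mem_cons_self ..)) dp h
    obtain ⟨h3, h4⟩ := ih (fun w hw => hds w (List.mem_cons_of_mem _ hw)) _ h1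
    exact ⟨h3, h4.trans h2⟩

-- the d = 1 pass fills dp[0..t] with true (given dp[0] is true)
theorem innerLoop_one (t : Nat) (dp : List Bool) (hlen : t < dp.length)
    (h0 : dp.getD 0 false = true) :
    ((PySem.List.pyRange 1 ((t : Int) + 1) 1).foldl
        (fun dp v => if PySem.List.pyGetD dp (v - 1) false then PySem.List.pySetD dp v true else dp)
        dp).length = dp.length ∧
      ∀ i ≤ t,
        ((PySem.List.pyRange 1 ((t : Int) + 1) 1).foldl
          (fun dp v => if PySem.List.pyGetD dp (v - 1) false then PySem.List.pySetD dp v true else dp)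
          dp).getD i false = true := by
  induction t with
  | zero =>
    rw [show ((0:Nat):Int) + 1 = 1 by norm_num, PySem.List.pyRange_one_eq_nil le_rfl]
    refine ⟨rfl, fun i hi => ?_⟩
    have : i = 0 := by omega
    subst this
    simpa using h0
  | succ t ih =>
    obtain ⟨ihlen, ihval⟩ := ih (by omega)
    have hsplit : PySem.List.pyRange 1 ((↑(t + 1) : Int) + 1) 1
        = PySem.List.pyRange 1 ((t : Int) + 1) 1 ++ [(t : Int) + 1] := by
      push_cast
      exact PySem.List.pyRange_one_succ_right (by omega)
    rw [hsplit, List.foldl_append]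
    set r := (PySem.List.pyRange 1 ((t : Int) + 1) 1).foldl
      (fun dp v => if PySem.List.pyGetD dp (v - 1) false then PySem.List.pySetD dp v true else dp)
      dp with hr
    simp only [List.foldl_cons, List.foldl_nil]
    have hcond : PySem.List.pyGetD r ((t : Int) + 1 - 1) false = true := by
      have : ((t : Int) + 1 - 1) = (t : Int) := by ring
      rw [this, PySem.List.pyGetD_natCast]
      exact ihval t le_rfl
    rw [hcond]
    simp only [if_true]
    have hcast : ((t : Int) + 1) = ((t + 1 : Nat) : Int) := by push_cast; ring
    rw [hcast, PySem.List.pySetD_natCast]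
    constructor
    · rw [List.length_set]; exact ihlen
    · intro i hi
      simp only [List.getD, List.getElem?_set]
      by_cases hit : t + 1 = i
      · subst hit
        rw [if_pos rfl, if_pos (by omega)]
        rfl
      · rw [if_neg hit]
        have := ihval i (by omega)
        simpa [List.getD] using this

-- every entry of the raw dim list is ≥ 1
theorem raw_dims_ge_one : ∀ y ∈ ([1, 23, 45, 45, 231, 231, 252, 253, 483, 770, 770,
    990, 990, 1035, 1035, 1035, 1265, 1771, 2024, 2277,
    3312, 3520, 5313, 5544, 5796, 10395] : List Int), 1 ≤ y := by decide

-- membership in the unique sorted dims equals membership in the raw literal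
theorem mem_uniqueDims (x : Int) :
    x ∈ PySem.List.sorted (PySem.Set.ofList M24_IRREP_DIMS) (fun x => x) false ↔
      x ∈ ([1, 23, 45, 45, 231, 231, 252, 253, 483, 770, 770,
        990, 990, 1035, 1035, 1035, 1265, 1771, 2024, 2277,
        3312, 3520, 5313, 5544, 5796, 10395] : List Int) := by
  rw [PySem.List.mem_sorted, PySem.Set.mem_ofList, M24_IRREP_DIMS, PySem.List.mem_sorted]

-- the unique sorted dim list starts with 1, and its tail is non-negative
theorem uniqueDims_shape :
    ∃ tl, PySem.List.sorted (PySem.Set.ofList M24_IRREP_DIMS) (fun x => x) false = 1 :: tl ∧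
      ∀ d ∈ tl, (0:Int) ≤ d := by
  rcases h : PySem.List.sorted (PySem.Set.ofList M24_IRREP_DIMS) (fun x => x) false with _ | ⟨m, tl⟩
  · exfalso
    have h1 : (1:Int) ∈ PySem.List.sorted (PySem.Set.ofList M24_IRREP_DIMS) (fun x => x) false := by
      rw [mem_uniqueDims]; decide
    rw [h] at h1
    exact absurd h1 (List.not_mem_nil)
  · have hle : ∀ y ∈ PySem.Set.ofList M24_IRREP_DIMS, m ≤ y :=
      PySem.List.key_head_sorted_le _ _ h
    have hm1 : m ≤ 1 := by
      refine hle 1 ?_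
      rw [PySem.Set.mem_ofList, M24_IRREP_DIMS, PySem.List.mem_sorted]; decide
    have hmem : m ∈ PySem.List.sorted (PySem.Set.ofList M24_IRREP_DIMS) (fun x => x) false := by
      rw [h]; exact List.mem_cons_self ..
    have h1m : 1 ≤ m := raw_dims_ge_one m ((mem_uniqueDims m).mp hmem)
    have : m = 1 := by omega
    subst this
    refine ⟨tl, rfl, fun d hd => ?_⟩
    have hdm : d ∈ PySem.List.sorted (PySem.Set.ofList M24_IRREP_DIMS) (fun x => x) false := by
      rw [h]; exact List.mem_cons_of_mem _ hd
    have := raw_dims_ge_one d ((mem_uniqueDims d).mp hdm)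
    omega

-- ===== VERDICT (by name: the statement is the Claim_ definition above) =====
theorem m24_decomposition_check_spec : Claim_equal_m24_decomposition_check := by
  intro target _
  unfold Spec_m24_decomposition_check m24_decomposition_check m24_decomposition_check_alt
  by_cases h : target ≤ 0
  · rw [if_pos h]
    by_cases h0 : target = 0
    · subst h0; decide
    · simp [h0, show ¬ (0 ≤ target) by omega]
  · rw [if_neg h]
    have htpos : 0 < target := by omega
    -- initial dp
    set n := (target + 1).toNat with hn
    have hn' : n = target.toNat + 1 := by omega
    have hdp0 : PySem.List.pySetD (List.replicate n false) 0 true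
        = (List.replicate n false).set 0 true := by
      rw [PySem.List.pySetD_of_nonneg _ _ (by norm_num)]
      rfl
    obtain ⟨tl, htl, htl0⟩ := uniqueDims_shape
    rw [htl]
    simp only [List.foldl_cons]
    -- the d = 1 pass: all-true, using innerLoop_one at t = target.toNat
    have hcast : target + 1 = ((target.toNat : Int) + 1) := by omega
    have hone := innerLoop_one target.toNat
      (PySem.List.pySetD (List.replicate n false) 0 true)
      (by rw [hdp0, List.length_set, List.length_replicate]; omega)
      (by rw [hdp0]
          simp [List.getD, hn'])
    set dp1 := m24InnerLoop target 1 (PySem.List.pySetD (List.replicate n false) 0 true) with hdp1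
    have hdp1eq : dp1 = (PySem.List.pyRange 1 ((target.toNat : Int) + 1) 1).foldl
        (fun dp v => if PySem.List.pyGetD dp (v - 1) false then PySem.List.pySetD dp v true else dp)
        (PySem.List.pySetD (List.replicate n false) 0 true) := by
      rw [hdp1]; unfold m24InnerLoop; rw [hcast]
    have hdp1len : dp1.length = target.toNat + 1 := by
      rw [hdp1eq, hone.1, hdp0, List.length_set, List.length_replicate, hn']
    have hdp1true : ∀ x ∈ dp1, x = true := by
      intro x hx
      obtain ⟨i, hi, hxi⟩ := List.mem_iff_getElem.mp hx
      have hival := hone.2 i (by omega)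
      rw [← hdp1eq] at hival
      rw [List.getD_eq_getElem?_getD, List.getElem?_eq_getElem hi] at hival
      simp at hival
      rw [← hxi]; exact hival
    -- the remaining dims keep dp all-true
    obtain ⟨hfin, hfinlen⟩ := outer_allTrue target tl htl0 dp1 hdp1true
    -- final lookup
    have hlen2 : (tl.foldl (fun dp d => m24InnerLoop target d dp) dp1).length = target.toNat + 1 := by
      rw [hfinlen, hdp1len]
    rw [PySem.List.pyGetD_eq_getElem _ _ (by omega) (by rw [hlen2]; push_cast; omega)]
    have := hfin _ (List.getElem_mem (l := tl.foldl (fun dp d => m24InnerLoop target d dp) dp1)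
      (n := target.toNat) (by omega))
    rw [this]
    simp [show (0:Int) ≤ target by omega]
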